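-- pv_equiv track=rewrite | github.com/DanteDeLordran/sequence_and_episode_mining | episode/episode.py | count_support
-- ===== SOURCE A (Python) =====
-- def count_support(sequences, pattern):
--     """Count the support of a pattern in the sequences."""
--     count = 0
--     for sequence in sequences:
--         seq_index = 0
--         for item in pattern:
--             if item in sequence[seq_index:]:
--                 seq_index = sequence.index(item, seq_index) + 1
--             else:
--                 break
--         else:
--             count += 1
--     return count
-- ===== SOURCE B (Python) =====
-- def count_support(sequences, pattern):
--     """Count the support of a pattern in the sequences (two-pointer subsequence test)."""
--     count = 0
--     m = len(pattern)
--     for sequence in sequences: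
--         j = 0
--         for x in sequence:
--             if j < m and x == pattern[j]:
--                 j += 1
--         if j == m:
--             count += 1
--     return count
-- ===== Notes on version B (the rewrite author's own statement) =====
-- stated objective: alternative
-- what changed: Replaces A's per-pattern-item membership test plus list.index rescans over shrinking suffixes with a single two-pointer pass over each sequence advancing one pattern index.
import Mathlib
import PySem

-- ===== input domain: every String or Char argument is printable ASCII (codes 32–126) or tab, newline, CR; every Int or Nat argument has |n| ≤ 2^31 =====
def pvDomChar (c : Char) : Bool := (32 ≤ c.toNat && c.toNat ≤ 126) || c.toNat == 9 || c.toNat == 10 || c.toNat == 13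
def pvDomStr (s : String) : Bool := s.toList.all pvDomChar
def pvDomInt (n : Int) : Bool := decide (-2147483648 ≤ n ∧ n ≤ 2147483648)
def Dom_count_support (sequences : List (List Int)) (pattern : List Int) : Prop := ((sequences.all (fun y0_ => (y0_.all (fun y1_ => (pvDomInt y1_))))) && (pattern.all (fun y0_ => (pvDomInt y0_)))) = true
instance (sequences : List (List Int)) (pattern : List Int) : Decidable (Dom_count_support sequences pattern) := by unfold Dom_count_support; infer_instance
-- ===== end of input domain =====

-- B replaces A's repeated suffix-membership + list.index rescans with one two-pointer pass per sequence (objective: alternative).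

-- ===== PORT A =====
-- inner 'for item in pattern' loop of A, recursing over pattern with the running seq_index;
-- sequence.index(item, seq_index) is ported as seq_index + first index of item in sequence[seq_index:],
-- exact here because seq_index starts at 0 and only ever increases (never negative).
def csAGo (sequence : List Int) : List Int → Int → Bool
  | [], _ => true
  | item :: rest, seqIndex =>
    let tail := PySem.List.slice sequence (some seqIndex) none
    if item ∈ tail then
      csAGo sequence rest (seqIndex + ((PySem.List.index? tail item).getD 0 : Nat) + 1)
    else
      false

def count_support (sequences : List (List Int)) (pattern : List Int) : Int :=
  sequences.foldl (fun count sequence =>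
    if csAGo sequence pattern 0 then count + 1 else count) 0

-- ===== PORT B =====
-- Source B's inner loop body: advance pattern index j when j < m and x == pattern[j]
def csBStep (pattern : List Int) (m : Int) (j : Int) (x : Int) : Int :=
  if j < m && PySem.List.pyGetD pattern j 0 == x then j + 1 else j

def csBGo (pattern : List Int) (m : Int) (sequence : List Int) : Int :=
  sequence.foldl (csBStep pattern m) 0

def count_support_alt (sequences : List (List Int)) (pattern : List Int) : Int :=
  let m : Int := pattern.length
  sequences.foldl (fun count sequence =>
    if csBGo pattern m sequence == m then count + 1 else count) 0

-- ===== PRECONDITION & SPEC =====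
def Spec_count_support (sequences : List (List Int)) (pattern : List Int) (out : Int) : Prop := out = count_support_alt sequences pattern
instance (sequences : List (List Int)) (pattern : List Int) (out : Int) : Decidable (Spec_count_support sequences pattern out) := by unfold Spec_count_support; infer_instance

-- ===== CLAIM (what is proved, stated in full; the proofs are below) =====
def Claim_equal_count_support : Prop := ∀ (sequences : List (List Int)) (pattern : List Int), Dom_count_support sequences pattern → Spec_count_support sequences pattern (count_support sequences pattern)

-- ===== LEMMAS AND PROOFS =====

theorem cons_sublist_cons_of_ne {a b : Int} {l r : List Int} (h : a ≠ b) :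
    List.Sublist (a :: l) (b :: r) ↔ List.Sublist (a :: l) r := by
  constructor
  · intro h'
    cases h' with
    | cons _ h2 => exact h2
    | cons₂ => exact absurd rfl h
  · intro h'
    exact h'.cons b

-- A's inner loop decides "pattern is a subsequence of sequence.drop i" (greedy first-occurrence matching)
theorem csAGo_eq_sublist (sequence pattern : List Int) (i : Nat) :
    csAGo sequence pattern (i : Int) = decide (List.Sublist pattern (sequence.drop i)) := by
  induction pattern generalizing i with
  | nil => simp [csAGo]
  | cons item rest ih =>
    rw [csAGo]
    rw [PySem.List.slice_from_natCast]
    by_cases hmem : item ∈ sequence.drop i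
    · simp only [hmem, if_pos]
      have hsome : ∃ k, PySem.List.index? (sequence.drop i) item = some k := by
        rcases Option.isSome_iff_exists.mp ((PySem.List.index?_isSome_iff _ _).mpr hmem) with ⟨k, hk⟩
        exact ⟨k, hk⟩
      rcases hsome with ⟨k, hk⟩
      rcases (PySem.List.index?_eq_some_iff _ _ _).mp hk with ⟨pre, suf, hsplit, hlen, hnotin⟩
      rw [hk]
      simp only [Option.getD_some]
      have hcast : (i : Int) + (k : Int) + 1 = ((i + k + 1 : Nat) : Int) := by push_cast; ring
      rw [hcast, ih]
      have hdrop : sequence.drop (i + k + 1) = suf := by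
        have h1 : sequence.drop (i + k + 1) = (sequence.drop i).drop (k + 1) := by
          rw [List.drop_drop]; ring_nf
        rw [h1, hsplit, ← hlen]
        simp [List.drop_append]
      rw [hdrop, hsplit]
      by_cases hsub : List.Sublist rest suf
      · simp only [hsub, decide_true]
        have : List.Sublist (item :: rest) (pre ++ item :: suf) :=
          ((List.cons_sublist_cons).mpr hsub).trans ((List.suffix_append pre _).sublist)
        simp [this]
      · simp only [hsub, decide_false]
        -- ¬ (item :: rest) <+ (pre ++ item :: suf), since item ∉ pre
        have : ¬ List.Sublist (item :: rest) (pre ++ item :: suf) := by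
          intro hS
          apply hsub
          clear hk hsplit hdrop hlen
          induction pre with
          | nil =>
            exact (List.cons_sublist_cons).mp hS
          | cons p ps ihp =>
            have hne : item ≠ p := fun he => hnotin (he ▸ List.mem_cons_self)
            exact ihp (fun hx => hnotin (List.mem_cons_of_mem _ hx)) ((cons_sublist_cons_of_ne hne).mp hS)
        simp [this]
    · simp only [hmem]
      have : ¬ List.Sublist (item :: rest) (sequence.drop i) := by
        intro hS
        exact hmem (hS.mem List.mem_cons_self)
      simp [this]

-- once j has reached m it stays at m
theorem csBGo_foldl_const (pattern : List Int) (m : Int) (sequence : List Int) :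
    sequence.foldl (csBStep pattern m) m = m := by
  induction sequence with
  | nil => rfl
  | cons x xs ih =>
    have hstep : csBStep pattern m m x = m := by
      unfold csBStep
      simp
    simp only [List.foldl_cons, hstep, ih]

-- B's inner fold from j0 reaches m exactly when pattern.drop j0 is a subsequence of the sequence
theorem csBGo_eq_sublist (pattern : List Int) (sequence : List Int) (j0 : Nat) (hj : j0 ≤ pattern.length) :
    (sequence.foldl (csBStep pattern pattern.length) (j0 : Int) = (pattern.length : Int))
    ↔ List.Sublist (pattern.drop j0) sequence := by
  induction sequence generalizing j0 with
  | nil =>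
    simp only [List.foldl_nil]
    constructor
    · intro h
      have hj0 : j0 = pattern.length := by exact_mod_cast h
      simp [hj0]
    · intro h
      have hnil : pattern.drop j0 = [] := List.sublist_nil.mp h
      have hlen0 : pattern.length - j0 = 0 := by
        have := congrArg List.length hnil
        simpa using this
      have hj0 : j0 = pattern.length := by omega
      exact_mod_cast congrArg (fun n : Nat => (n : Int)) hj0
  | cons x xs ih =>
    simp only [List.foldl_cons]
    by_cases hlt : j0 < pattern.length
    · have hget : PySem.List.pyGetD pattern (j0 : Int) 0 = pattern[j0] := by
        rw [PySem.List.pyGetD_natCast]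
        simp [hlt]
      have hdrop : pattern.drop j0 = pattern[j0] :: pattern.drop (j0 + 1) :=
        (List.drop_eq_getElem_cons hlt)
      by_cases heq : pattern[j0] = x
      · have hstep : csBStep pattern pattern.length (j0 : Int) x = (j0 : Int) + 1 := by
          unfold csBStep
          simp [hget, heq, hlt]
        rw [hstep]
        have hcast : (j0 : Int) + 1 = ((j0 + 1 : Nat) : Int) := by push_cast; ring
        rw [hcast, ih (j0 + 1) (by omega)]
        rw [hdrop, heq]
        exact (List.cons_sublist_cons).symm
      · have hstep : csBStep pattern pattern.length (j0 : Int) x = (j0 : Int) := by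
          unfold csBStep
          simp [hget, heq]
        rw [hstep, ih j0 hj, hdrop, ← hdrop]
        rw [hdrop]
        exact (cons_sublist_cons_of_ne heq).symm
    · have hj0 : j0 = pattern.length := by omega
      subst hj0
      have hstep : csBStep pattern pattern.length (pattern.length : Int) x = (pattern.length : Int) := by
        unfold csBStep
        simp
      rw [hstep, csBGo_foldl_const]
      simp [List.drop_length]

-- per-sequence agreement of the two inner loops
theorem inner_agree (sequence pattern : List Int) :
    csAGo sequence pattern 0 = (csBGo pattern pattern.length sequence == (pattern.length : Int)) := by
  have hA : csAGo sequence pattern 0 = decide (List.Sublist pattern sequence) := by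
    have := csAGo_eq_sublist sequence pattern 0
    simpa using this
  rw [hA]
  have hB := csBGo_eq_sublist pattern sequence 0 (by omega)
  simp only [Nat.cast_zero, List.drop_zero] at hB
  unfold csBGo
  by_cases h : List.Sublist pattern sequence
  · simp [hB.mpr h, h]
  · have : ¬ (sequence.foldl (csBStep pattern pattern.length) 0 = (pattern.length : Int)) := fun hx => h (hB.mp hx)
    simp [this, h]

theorem foldl_count_agree (sequences : List (List Int)) (pattern : List Int) (c : Int) :
    sequences.foldl (fun count sequence => if csAGo sequence pattern 0 then count + 1 else count) c
    = sequences.foldl (fun count sequence => if csBGo pattern pattern.length sequence == (pattern.length : Int) then count + 1 else count) c := by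
  induction sequences generalizing c with
  | nil => rfl
  | cons s ss ih =>
    simp only [List.foldl_cons, inner_agree s pattern]
    exact ih _

-- ===== VERDICT (by name: the statement is the Claim_ definition above) =====
theorem count_support_spec : Claim_equal_count_support := by
  intro sequences pattern _
  unfold Spec_count_support count_support count_support_alt
  exact foldl_count_agree sequences pattern 0
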